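-- pv_equiv track=rewrite | github.com/Helix-Research-Lab/ESM_highAttention | code/ESM_pfam_msa.py | convert_index
-- ===== SOURCE A (Python) =====
-- def convert_index(seq_ind, prot, seq):
--     counter = 0
--     alignSeq = seq
--     for align_ind in range(0, len(alignSeq)):
--         c = alignSeq[align_ind]
--         if (c != '-'):
--             counter += 1
--             if (counter == seq_ind):
--                 return (align_ind+1)
-- ===== SOURCE B (Python) =====
-- def convert_index(seq_ind, prot, seq):
--     positions = [i for i, c in enumerate(seq) if c != '-']
--     if 1 <= seq_ind <= len(positions):
--         return positions[seq_ind - 1] + 1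
--     return None
-- ===== Notes on version B (the rewrite author's own statement) =====
-- stated objective: alternative
-- what changed: Replaces A's early-exit count-and-check loop by building the table of alignment positions of non-gap characters once and doing a single bounds-checked indexed lookup.
import Mathlib
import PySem

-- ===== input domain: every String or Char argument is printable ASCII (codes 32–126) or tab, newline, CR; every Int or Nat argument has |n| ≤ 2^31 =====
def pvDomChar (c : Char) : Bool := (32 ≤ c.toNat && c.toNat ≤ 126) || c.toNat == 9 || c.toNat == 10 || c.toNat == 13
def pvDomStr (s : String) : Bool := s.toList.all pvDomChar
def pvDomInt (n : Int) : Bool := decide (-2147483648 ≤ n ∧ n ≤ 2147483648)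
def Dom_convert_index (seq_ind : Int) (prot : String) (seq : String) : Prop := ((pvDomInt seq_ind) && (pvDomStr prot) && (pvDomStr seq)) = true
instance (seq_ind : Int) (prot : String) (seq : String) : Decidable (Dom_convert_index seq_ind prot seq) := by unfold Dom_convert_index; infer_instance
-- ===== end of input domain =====

-- B replaces A's early-exit count-and-check loop by building the table of
-- non-gap alignment positions once and doing one bounds-checked lookup (alternative decomposition).

-- ===== PORT A =====
-- the for-loop over range(0, len(seq)) with state `counter` and early return inside
def convertLoopA (seq_ind : Int) (cs : List Char) (counter : Int) (align_ind : Nat) : Option Int :=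
  match cs with
  | [] => none
  | c :: rest =>
    if c ≠ '-' then
      if counter + 1 = seq_ind then some ((align_ind : Int) + 1)
      else convertLoopA seq_ind rest (counter + 1) (align_ind + 1)
    else convertLoopA seq_ind rest counter (align_ind + 1)

def convert_index (seq_ind : Int) (prot : String) (seq : String) : Option Int :=
  convertLoopA seq_ind seq.toList 0 0

-- ===== PORT B =====
-- positions = [i for i, c in enumerate(seq) if c != '-']
def pvPositions (seq : String) : List Int :=
  (seq.toList.zipIdx).filterMap (fun p => if p.1 ≠ '-' then some ((p.2 : Int)) else none)

-- return positions[seq_ind-1]+1 if 1 <= seq_ind <= len(positions) else None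
def convert_index_alt (seq_ind : Int) (prot : String) (seq : String) : Option Int :=
  if 1 ≤ seq_ind ∧ seq_ind ≤ (pvPositions seq).length then
    some ((pvPositions seq)[(seq_ind - 1).toNat]! + 1)
  else none

-- ===== PRECONDITION & SPEC =====
def Spec_convert_index (seq_ind : Int) (prot : String) (seq : String) (out : Option Int) : Prop := out = convert_index_alt seq_ind prot seq
instance (seq_ind : Int) (prot : String) (seq : String) (out : Option Int) : Decidable (Spec_convert_index seq_ind prot seq out) := by unfold Spec_convert_index; infer_instance

-- ===== CLAIM (what is proved, stated in full; the proofs are below) =====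
def Claim_equal_convert_index : Prop := ∀ (seq_ind : Int) (prot : String) (seq : String), Dom_convert_index seq_ind prot seq → Spec_convert_index seq_ind prot seq (convert_index seq_ind prot seq)

-- ===== LEMMAS AND PROOFS =====

-- position table of the remaining characters, indices starting at offset k
def pvPosFrom (cs : List Char) (k : Nat) : List Int :=
  (cs.zipIdx k).filterMap (fun p => if p.1 ≠ '-' then some ((p.2 : Int)) else none)

lemma pvPosFrom_cons_gap (rest : List Char) (k : Nat) :
    pvPosFrom ('-' :: rest) k = pvPosFrom rest (k + 1) := by
  simp [pvPosFrom, List.zipIdx_cons]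

lemma pvPosFrom_cons_nongap (c : Char) (rest : List Char) (k : Nat) (hc : ¬ c = '-') :
    pvPosFrom (c :: rest) k = (k : Int) :: pvPosFrom rest (k + 1) := by
  simp [pvPosFrom, List.zipIdx_cons, hc]

-- Loop invariant: A's loop from offset k with `counter` positions already counted
-- equals a bounds-checked lookup into the position table of the remaining characters.
lemma convertLoopA_eq (seq_ind : Int) (cs : List Char) :
    ∀ (k : Nat) (counter : Int),
      convertLoopA seq_ind cs counter k =
        if counter + 1 ≤ seq_ind ∧ seq_ind ≤ counter + (pvPosFrom cs k).length then
          some ((pvPosFrom cs k)[(seq_ind - counter - 1).toNat]! + 1)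
        else none := by
  induction cs with
  | nil =>
    intro k counter
    rw [if_neg (by simp [pvPosFrom])]
    rfl
  | cons c rest ih =>
    intro k counter
    by_cases hc : c = '-'
    · subst hc
      have h1 : convertLoopA seq_ind ('-' :: rest) counter k
          = convertLoopA seq_ind rest counter (k + 1) := by
        simp [convertLoopA]
      rw [h1, ih (k + 1) counter, pvPosFrom_cons_gap]
    · have h1 : convertLoopA seq_ind (c :: rest) counter k
          = if counter + 1 = seq_ind then some ((k : Int) + 1)
            else convertLoopA seq_ind rest (counter + 1) (k + 1) := by
        simp [convertLoopA, hc]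
      rw [h1, pvPosFrom_cons_nongap c rest k hc]
      by_cases heq : counter + 1 = seq_ind
      · rw [if_pos heq, if_pos (by simp [List.length_cons]; push_cast; omega)]
        have h0 : (seq_ind - counter - 1).toNat = 0 := by omega
        rw [h0, List.getElem!_cons_zero]
      · rw [if_neg heq, ih (k + 1) (counter + 1)]
        by_cases hle : counter + 1 + 1 ≤ seq_ind ∧ seq_ind ≤ counter + 1 + (pvPosFrom rest (k + 1)).length
        · rw [if_pos hle, if_pos (by simp only [List.length_cons]; push_cast at hle ⊢; omega)]
          have h1' : (seq_ind - counter - 1).toNat = (seq_ind - (counter + 1) - 1).toNat + 1 := by omega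
          rw [h1', List.getElem!_cons_succ]
        · rw [if_neg hle, if_neg (by simp only [List.length_cons]; push_cast at hle ⊢; omega)]

-- ===== VERDICT (by name: the statement is the Claim_ definition above) =====
theorem convert_index_spec : Claim_equal_convert_index := by
  intro seq_ind prot seq _
  unfold Spec_convert_index convert_index convert_index_alt
  rw [convertLoopA_eq]
  have hps : pvPosFrom seq.toList 0 = pvPositions seq := rfl
  rw [hps]
  simp only [sub_zero, zero_add]
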